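-- pv_equiv track=rewrite | github.com/Krunk-Juice/Cumluative-Frequencies | CumulatitveFrequencies.py | cumulative_frequencies
-- ===== SOURCE A (Python) =====
-- def cumulative_frequencies(frequencies_list, sorted_synonym_group):
--     word_frequencies = []
--     CF = []
--
--     for i in range(len(sorted_synonym_group)):
--         primary_word = sorted_synonym_group[i][0]
--         total_frequency = 0
--         # for j in sorted_synonym_group[i]:
--         for k in range(len(frequencies_list)):
--             if frequencies_list[k][0] in sorted_synonym_group[i]:
--                 total_frequency = total_frequency + frequencies_list[k][1]
--         word_frequencies.append(primary_word)
--         word_frequencies.append(total_frequency)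
--
--     for j in range(len(word_frequencies)//2):
--         CF_pair = (word_frequencies[2*j], word_frequencies[2*j + 1])
--         CF.append(CF_pair)
--
--     return CF
-- ===== SOURCE B (Python) =====
-- def cumulative_frequencies(frequencies_list, sorted_synonym_group):
--     # Inverted index: word -> list of indices of the groups containing it
--     # (deduped within a group), then one pass over frequencies_list.
--     index = {}
--     for i, group in enumerate(sorted_synonym_group):
--         for w in set(group):
--             index.setdefault(w, []).append(i)
--     totals = [0] * len(sorted_synonym_group)
--     for w, f in frequencies_list:
--         for i in index.get(w, ()):
--             totals[i] += f
--     return [(g[0], t) for g, t in zip(sorted_synonym_group, totals)]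
-- ===== Notes on version B (the rewrite author's own statement) =====
-- stated objective: faster
-- what changed: Replaces A's nested scan (for every group, rescan all frequencies and test list membership in the group) by an inverted index word->group-indices built once, a single pass over the frequency list updating a totals array, and a final zip; the heterogeneous flat word/total list and its pairing loop are gone.
import Mathlib
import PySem

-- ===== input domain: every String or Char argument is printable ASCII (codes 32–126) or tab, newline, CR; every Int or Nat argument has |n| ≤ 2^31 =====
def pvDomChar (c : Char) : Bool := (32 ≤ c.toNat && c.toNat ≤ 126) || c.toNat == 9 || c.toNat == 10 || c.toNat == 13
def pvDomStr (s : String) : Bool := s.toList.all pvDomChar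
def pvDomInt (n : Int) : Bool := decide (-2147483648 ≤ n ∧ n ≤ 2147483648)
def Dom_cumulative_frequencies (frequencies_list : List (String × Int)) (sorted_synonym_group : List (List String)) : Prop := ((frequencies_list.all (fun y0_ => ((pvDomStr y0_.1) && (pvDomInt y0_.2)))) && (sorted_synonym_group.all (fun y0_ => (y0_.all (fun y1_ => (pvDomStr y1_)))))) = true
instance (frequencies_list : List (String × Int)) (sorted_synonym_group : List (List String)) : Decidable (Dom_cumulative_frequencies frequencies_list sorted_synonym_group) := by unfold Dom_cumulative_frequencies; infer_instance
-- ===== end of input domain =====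

-- B replaces A's nested rescans by an inverted index word -> group indices plus a single
-- pass over the frequency list (objective: faster; return value only, no mutation).

-- ===== PORT A =====
-- Python's flat heterogeneous word_frequencies list (str and int alternating) is ported as
-- List (String ⊕ Int); the match defaults ("" / 0) are never reached under the construction.
def cumulative_frequencies (frequencies_list : List (String × Int)) (sorted_synonym_group : List (List String)) : List (String × Int) :=
  let word_frequencies : List (String ⊕ Int) :=
    (PySem.List.pyRange 0 (sorted_synonym_group.length : Int) 1).foldl (fun wf i =>
      let primary_word := PySem.List.pyGetD (PySem.List.pyGetD sorted_synonym_group i []) 0 ""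
      let total_frequency :=
        (PySem.List.pyRange 0 (frequencies_list.length : Int) 1).foldl (fun t k =>
          let p := PySem.List.pyGetD frequencies_list k ("", 0)
          if p.1 ∈ PySem.List.pyGetD sorted_synonym_group i [] then t + p.2 else t) 0
      wf ++ [Sum.inl primary_word] ++ [Sum.inr total_frequency]) []
  (PySem.List.pyRange 0 (PySem.Int.floordiv (word_frequencies.length : Int) 2) 1).foldl (fun CF j =>
    let w := match PySem.List.pyGetD word_frequencies (2*j) (Sum.inl "") with
             | Sum.inl s => s | Sum.inr _ => ""
    let t := match PySem.List.pyGetD word_frequencies (2*j+1) (Sum.inr 0) with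
             | Sum.inr n => n | Sum.inl _ => 0
    CF ++ [(w, t)]) []

-- ===== PORT B =====
-- Source B's 'for i, group in enumerate(...)' loop, carrying the running index explicitly.
def pvBIndexLoop (gs : List (List String)) (i : Nat) (d : PySem.Dict String (List Nat)) : PySem.Dict String (List Nat) :=
  match gs with
  | [] => d
  | g :: rest => pvBIndexLoop rest (i+1)
      ((PySem.Set.ofList g).foldl (fun d w => d.modify w [] (fun l => l ++ [i])) d)

def cumulative_frequencies_alt (frequencies_list : List (String × Int)) (sorted_synonym_group : List (List String)) : List (String × Int) :=
  let index := pvBIndexLoop sorted_synonym_group 0 PySem.Dict.empty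
  let totals : List Int :=
    frequencies_list.foldl (fun ts p =>
      (index.getD p.1 []).foldl (fun ts i => ts.set i (ts.getD i 0 + p.2)) ts)
      (List.replicate sorted_synonym_group.length 0)
  (sorted_synonym_group.zip totals).map (fun gt => (PySem.List.pyGetD gt.1 0 "", gt.2))

-- ===== PRECONDITION & SPEC =====
-- Pre_ excludes inputs containing an empty synonym group: there Python A (and B alike)
-- raises IndexError on group[0].
def Pre_cumulative_frequencies (frequencies_list : List (String × Int)) (sorted_synonym_group : List (List String)) : Prop :=
  ∀ g ∈ sorted_synonym_group, g ≠ []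
instance (frequencies_list : List (String × Int)) (sorted_synonym_group : List (List String)) : Decidable (Pre_cumulative_frequencies frequencies_list sorted_synonym_group) := by unfold Pre_cumulative_frequencies; infer_instance
def pvWitness_cumulative_frequencies : (List (String × Int)) × List (List String) :=
  ([("cat", 3), ("dog", 2), ("cat", 1)], [["cat", "feline"], ["dog"]])
def Spec_cumulative_frequencies (frequencies_list : List (String × Int)) (sorted_synonym_group : List (List String)) (out : List (String × Int)) : Prop := out = cumulative_frequencies_alt frequencies_list sorted_synonym_group
instance (frequencies_list : List (String × Int)) (sorted_synonym_group : List (List String)) (out : List (String × Int)) : Decidable (Spec_cumulative_frequencies frequencies_list sorted_synonym_group out) := by unfold Spec_cumulative_frequencies; infer_instance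

-- ===== CLAIM (what is proved, stated in full; the proofs are below) =====
def Claim_equal_cumulative_frequencies : Prop := ∀ (frequencies_list : List (String × Int)) (sorted_synonym_group : List (List String)), Dom_cumulative_frequencies frequencies_list sorted_synonym_group → Pre_cumulative_frequencies frequencies_list sorted_synonym_group → Spec_cumulative_frequencies frequencies_list sorted_synonym_group (cumulative_frequencies frequencies_list sorted_synonym_group)

-- ===== LEMMAS AND PROOFS =====

-- the common normal form both ports are reduced to: per group, the sum of the matching frequencies
def pvS (fl : List (String × Int)) (g : List String) : Int :=
  fl.foldl (fun t p => if p.1 ∈ g then t + p.2 else t) 0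

-- ---- A side: word_frequencies is the pair list flattened; the pairing loop undoes it ----
def pvEnc (ps : List (String × Int)) : List (String ⊕ Int) :=
  ps.flatMap (fun p => [Sum.inl p.1, Sum.inr p.2])

theorem pvEnc_length (ps : List (String × Int)) : (pvEnc ps).length = 2 * ps.length := by
  induction ps with
  | nil => rfl
  | cons p ps ih => simp [pvEnc] at ih ⊢; omega

theorem pvEnc_getD_even : ∀ (ps : List (String × Int)) (k : Nat), k < ps.length →
    (pvEnc ps).getD (2*k) (Sum.inl "") = Sum.inl (ps.getD k ("", 0)).1 := by
  intro ps
  induction ps with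
  | nil => intro k hk; simp at hk
  | cons p ps ih =>
    intro k hk
    cases k with
    | zero => simp [pvEnc]
    | succ k =>
      have h2 : 2 * (k+1) = (2*k) + 1 + 1 := by omega
      simp only [h2, pvEnc, List.flatMap_cons, List.cons_append, List.getD_cons_succ]
      exact ih k (by simpa using hk)

theorem pvEnc_getD_odd : ∀ (ps : List (String × Int)) (k : Nat), k < ps.length →
    (pvEnc ps).getD (2*k+1) (Sum.inr 0) = Sum.inr (ps.getD k ("", 0)).2 := by
  intro ps
  induction ps with
  | nil => intro k hk; simp at hk
  | cons p ps ih =>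
    intro k hk
    cases k with
    | zero => simp [pvEnc]
    | succ k =>
      have h2 : 2 * (k+1) + 1 = (2*k+1) + 1 + 1 := by omega
      simp only [h2, pvEnc, List.flatMap_cons, List.cons_append, List.getD_cons_succ]
      exact ih k (by simpa using hk)

theorem decode_enc (ps : List (String × Int)) :
    (PySem.List.pyRange 0 (PySem.Int.floordiv ((pvEnc ps).length : Int) 2) 1).foldl (fun CF j =>
      CF ++ [(match PySem.List.pyGetD (pvEnc ps) (2*j) (Sum.inl "") with
              | Sum.inl s => s | Sum.inr _ => "",
              match PySem.List.pyGetD (pvEnc ps) (2*j+1) (Sum.inr 0) with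
              | Sum.inr n => n | Sum.inl _ => 0)]) [] = ps := by
  have hfd : PySem.Int.floordiv ((pvEnc ps).length : Int) 2 = (ps.length : Int) := by
    rw [pvEnc_length]
    have h := PySem.Int.floordiv_natCast (2 * ps.length) 2
    rw [Nat.mul_div_cancel_left _ (by omega)] at h
    exact_mod_cast h
  rw [hfd, PySem.List.foldl_append_singleton_eq_map, List.nil_append,
    PySem.List.pyRange_zero_natCast, List.map_map]
  apply List.ext_getElem
  · simp
  · intro k h1 h2
    simp only [List.getElem_map, List.getElem_range, Function.comp_apply]
    have hk : k < ps.length := by simpa using h2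
    have he : (2 : Int) * (k : Nat) = ((2*k : Nat) : Int) := by push_cast; ring
    have ho : ((2*k : Nat) : Int) + 1 = ((2*k+1 : Nat) : Int) := by push_cast; ring
    rw [he, ho, PySem.List.pyGetD_natCast, PySem.List.pyGetD_natCast,
      pvEnc_getD_even ps k hk, pvEnc_getD_odd ps k hk,
      List.getD_eq_getElem _ _ hk]

theorem A_wf_eq (fl : List (String × Int)) (gs : List (List String)) :
    (PySem.List.pyRange 0 (gs.length : Int) 1).foldl (fun wf i =>
      let primary_word := PySem.List.pyGetD (PySem.List.pyGetD gs i []) 0 ""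
      let total_frequency :=
        (PySem.List.pyRange 0 (fl.length : Int) 1).foldl (fun t k =>
          let p := PySem.List.pyGetD fl k ("", 0)
          if p.1 ∈ PySem.List.pyGetD gs i [] then t + p.2 else t) 0
      wf ++ [Sum.inl primary_word] ++ [Sum.inr total_frequency]) []
    = pvEnc (gs.map (fun g => (PySem.List.pyGetD g 0 "", pvS fl g))) := by
  have houter := PySem.List.foldl_pyRange_zero_pyGetD' gs []
    (fun (wf : List (String ⊕ Int)) (g : List String) =>
      wf ++ [Sum.inl (PySem.List.pyGetD g 0 "")] ++
        [Sum.inr ((PySem.List.pyRange 0 (fl.length : Int) 1).foldl (fun t k =>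
          let p := PySem.List.pyGetD fl k ("", 0)
          if p.1 ∈ g then t + p.2 else t) 0)]) []
  rw [houter]
  have hinner : ∀ g : List String,
      (PySem.List.pyRange 0 (fl.length : Int) 1).foldl (fun t k =>
        let p := PySem.List.pyGetD fl k ("", 0)
        if p.1 ∈ g then t + p.2 else t) 0 = pvS fl g := by
    intro g
    exact PySem.List.foldl_pyRange_zero_pyGetD' fl ("", 0)
      (fun t p => if p.1 ∈ g then t + p.2 else t) 0
  simp only [hinner, List.append_assoc, List.singleton_append]
  rw [show (fun (wf : List (String ⊕ Int)) (g : List String) =>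
        wf ++ [Sum.inl (PySem.List.pyGetD g 0 ""), Sum.inr (pvS fl g)])
      = (fun (wf : List (String ⊕ Int)) (g : List String) =>
        wf ++ (fun g => [Sum.inl (PySem.List.pyGetD g 0 ""), Sum.inr (pvS fl g)]) g) from rfl,
    PySem.List.foldl_append_eq_flatMap, List.nil_append]
  unfold pvEnc
  rw [List.flatMap_map]

theorem A_eq_map (fl : List (String × Int)) (gs : List (List String)) :
    cumulative_frequencies fl gs = gs.map (fun g => (PySem.List.pyGetD g 0 "", pvS fl g)) := by
  unfold cumulative_frequencies
  rw [A_wf_eq fl gs]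
  exact decode_enc _

-- ---- B side: the inverted index holds each group index exactly once per member word ----
theorem filter_beq_of_nodup {α : Type} [DecidableEq α] (w : α) :
    ∀ (l : List α), l.Nodup → l.filter (fun x => x == w) = if w ∈ l then [w] else [] := by
  intro l
  induction l with
  | nil => simp
  | cons x l ih =>
    intro h
    rcases List.nodup_cons.mp h with ⟨hx, hl⟩
    by_cases hxw : x = w
    · subst hxw
      simp [ih hl, hx]
    · simp [hxw, ih hl]
      have hne : ¬ w = x := fun h' => hxw h'.symm
      simp [hne]

theorem inner_set_fold (g : List String) (i : Nat) (d : PySem.Dict String (List Nat)) (w : String) :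
    ((PySem.Set.ofList g).foldl (fun d w' => d.modify w' [] (fun l => l ++ [i])) d).getD w []
      = d.getD w [] ++ (if w ∈ g then [i] else []) := by
  have h := PySem.Dict.getD_foldl_modify_append
    (l := (PySem.Set.ofList g).map (fun w' => (w', i))) (d := d) (c := w)
  rw [List.foldl_map] at h
  rw [h]
  congr 1
  rw [List.filter_map, List.map_map]
  have hc : ((fun p => p.1 == w) ∘ (fun w' => (w', i))) = (fun x => x == w) := rfl
  rw [hc, filter_beq_of_nodup w _ (PySem.Set.nodup_ofList g)]
  by_cases hmem : w ∈ g <;> simp [hmem, PySem.Set.mem_ofList]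

theorem bIndex_count (w : String) :
    ∀ (gs : List (List String)) (k : Nat) (d : PySem.Dict String (List Nat)) (j : Nat),
    ((pvBIndexLoop gs k d).getD w []).count j
      = (d.getD w []).count j + (if k ≤ j ∧ w ∈ gs.getD (j - k) [] then 1 else 0) := by
  intro gs
  induction gs with
  | nil => intro k d j; simp [pvBIndexLoop]
  | cons g rest ih =>
    intro k d j
    show ((pvBIndexLoop rest (k+1) _).getD w []).count j = _
    rw [ih]
    rw [inner_set_fold]
    rcases Nat.lt_trichotomy j k with hlt | heq | hgt
    · have h1 : ¬ (k+1 ≤ j) := by omega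
      have h2 : ¬ (k ≤ j) := by omega
      simp [h1, h2, List.count_append]
      split_ifs <;> simp_all [List.count_singleton] <;> omega
    · subst heq
      have h1 : ¬ (j+1 ≤ j) := by omega
      have h2 : j - j = 0 := by omega
      simp [h1, h2, List.count_append]
      split_ifs <;> simp_all
    · obtain ⟨m, rfl⟩ : ∃ m, j = k + m + 1 := ⟨j - k - 1, by omega⟩
      have h1 : (k + m + 1) - (k+1) = m := by omega
      have h2 : (k + m + 1) - k = m + 1 := by omega
      have h3 : (k+1 ≤ k + m + 1) := by omega
      have h4 : (k ≤ k + m + 1) := by omega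
      simp [h1, h2, h3, h4, List.count_append]
      split_ifs <;> simp_all [List.count_singleton] <;> omega

theorem bumpFold_len (f : Int) :
    ∀ (idxs : List Nat) (ts : List Int),
    (idxs.foldl (fun ts i => ts.set i (ts.getD i 0 + f)) ts).length = ts.length := by
  intro idxs
  induction idxs with
  | nil => intro ts; rfl
  | cons i idxs ih => intro ts; rw [List.foldl_cons, ih, List.length_set]

theorem bumpFold_getD (f : Int) :
    ∀ (idxs : List Nat) (ts : List Int) (j : Nat), j < ts.length →
    (idxs.foldl (fun ts i => ts.set i (ts.getD i 0 + f)) ts).getD j 0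
      = ts.getD j 0 + f * (idxs.count j) := by
  intro idxs
  induction idxs with
  | nil => intro ts j hj; simp
  | cons i idxs ih =>
    intro ts j hj
    rw [List.foldl_cons, ih _ j (by simpa using hj)]
    by_cases hij : i = j
    · subst hij
      rw [List.getD_eq_getElem?_getD, List.getElem?_set_self (by omega), List.count_cons]
      simp [List.getD_eq_getElem?_getD, List.getElem?_eq_getElem hj]
      ring
    · rw [List.getD_eq_getElem?_getD, List.getElem?_set_ne hij, List.count_cons]
      simp [List.getD_eq_getElem?_getD, hij]

theorem totals_getD (gs : List (List String)) (j : Nat) :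
    ∀ (fl : List (String × Int)) (ts : List Int), ts.length = gs.length → j < gs.length →
    (fl.foldl (fun ts p =>
        ((pvBIndexLoop gs 0 PySem.Dict.empty).getD p.1 []).foldl
          (fun ts i => ts.set i (ts.getD i 0 + p.2)) ts) ts).getD j 0
      = fl.foldl (fun t p => if p.1 ∈ gs.getD j [] then t + p.2 else t) (ts.getD j 0) := by
  intro fl
  induction fl with
  | nil => intro ts h hj; rfl
  | cons p fl ih =>
    intro ts h hj
    rw [List.foldl_cons, List.foldl_cons,
      ih _ (by rw [bumpFold_len]; exact h) hj,
      bumpFold_getD _ _ _ j (by omega),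
      bIndex_count]
    simp [PySem.Dict.getD_empty]
    split_ifs with hmem <;> simp

theorem totals_len (gs : List (List String)) :
    ∀ (fl : List (String × Int)) (ts : List Int),
    (fl.foldl (fun ts p =>
        ((pvBIndexLoop gs 0 PySem.Dict.empty).getD p.1 []).foldl
          (fun ts i => ts.set i (ts.getD i 0 + p.2)) ts) ts).length = ts.length := by
  intro fl
  induction fl with
  | nil => intro ts; rfl
  | cons p fl ih => intro ts; rw [List.foldl_cons, ih, bumpFold_len]

theorem B_eq_map (fl : List (String × Int)) (gs : List (List String)) :
    cumulative_frequencies_alt fl gs = gs.map (fun g => (PySem.List.pyGetD g 0 "", pvS fl g)) := by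
  unfold cumulative_frequencies_alt
  have htl := totals_len gs fl (List.replicate gs.length 0)
  rw [List.length_replicate] at htl
  apply List.ext_getElem
  · rw [List.length_map, List.length_map, List.length_zip, htl, min_self]
  · intro j h1 h2
    rw [List.getElem_map, List.getElem_map, List.getElem_zip]
    have hj : j < gs.length := by simpa using h2
    congr 1
    rw [← List.getD_eq_getElem _ (0 : Int) (by rw [htl]; exact hj),
      totals_getD gs j fl _ (by rw [List.length_replicate]) hj,
      List.getD_replicate, List.getD_eq_getElem _ ([] : List String) hj]
    · rfl
    · exact hj

-- ===== VERDICT (by name: the statement is the Claim_ definition above) =====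
theorem cumulative_frequencies_spec : Claim_equal_cumulative_frequencies := by
  intro fl gs _ _
  unfold Spec_cumulative_frequencies
  rw [A_eq_map, B_eq_map]
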